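-- pv_equiv track=rewrite | github.com/Delphine-L/VGP-planemo-scripts | batch_vgp_run/utils.py | find_duplicate_values
-- ===== SOURCE A (Python) =====
-- from collections import defaultdict
--
-- def find_duplicate_values(input_dict):
--     """
--     Find values in a dictionary that are associated with multiple keys.
--
--     Args:
--         input_dict (dict): The dictionary to search for duplicate values
--
--     Returns:
--         dict: A dictionary where keys are the duplicate values and values are
--               lists of keys that share that value
--     """
--     reversed_dict = defaultdict(list)
--     for key, value in input_dict.items():
--         reversed_dict[value].append(key)
--
--     duplicate_values = {
--         value: keys
--         for value, keys in reversed_dict.items()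
--         if len(keys) > 1
--     }
--     return duplicate_values
-- ===== SOURCE B (Python) =====
-- def find_duplicate_values(input_dict):
--     """
--     Find values in a dictionary that are associated with multiple keys.
--
--     No reverse-grouping dict: walk the items once and, at the first
--     occurrence of each value (checked by rescanning the processed prefix),
--     rescan the whole item list to gather every key holding that value;
--     emit the group only when it has more than one key.
--     """
--     items = list(input_dict.items())
--     result = {}
--     for i, (key, value) in enumerate(items):
--         if any(v == value for _, v in items[:i]):
--             continue  # value already handled at its first occurrence
--         keys = [k for k, v in items if v == value]
--         if len(keys) > 1:
--             result[value] = keys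
--     return result
-- ===== Notes on version B (the rewrite author's own statement) =====
-- stated objective: alternative
-- what changed: B removes the reversed defaultdict and the filtering comprehension entirely: one outer loop that, at each value's first occurrence (detected by rescanning the processed prefix), rescans the full item list to collect the keys sharing that value and emits the group only if it has more than one key - nested rescans instead of dict grouping.
import Mathlib
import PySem

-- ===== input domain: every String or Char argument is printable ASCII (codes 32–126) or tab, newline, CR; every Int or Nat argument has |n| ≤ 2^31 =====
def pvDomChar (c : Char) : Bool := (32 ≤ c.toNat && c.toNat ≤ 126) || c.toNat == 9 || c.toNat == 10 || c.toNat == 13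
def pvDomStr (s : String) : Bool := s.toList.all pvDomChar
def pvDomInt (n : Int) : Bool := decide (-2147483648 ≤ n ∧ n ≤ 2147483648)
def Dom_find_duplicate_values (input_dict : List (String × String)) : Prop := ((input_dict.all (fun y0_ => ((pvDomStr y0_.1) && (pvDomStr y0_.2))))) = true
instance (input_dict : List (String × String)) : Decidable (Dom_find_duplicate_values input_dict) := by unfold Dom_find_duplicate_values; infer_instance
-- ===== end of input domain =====

-- B drops A's reversed defaultdict: one outer loop that, at each value's first
-- occurrence (found by rescanning the processed prefix), rescans the whole item
-- list to gather the keys sharing that value (nested scans, no grouping dict).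

-- ===== PORT A =====
def find_duplicate_values (input_dict : List (String × String)) : List (String × List String) :=
  let reversed := input_dict.foldl (fun d p => d.modify p.2 [] (· ++ [p.1])) PySem.Dict.empty
  -- the dict comprehension: build a dict from the items whose key-list has length > 1
  let duplicate_values :=
    (reversed.items.filter (fun q => decide (1 < q.2.length))).foldl
      (fun d q => d.insert q.1 q.2) PySem.Dict.empty
  duplicate_values.items

-- ===== PORT B =====
-- the loop of Source B as structural recursion: 'seen' is items[:i], 'rest' is items[i:];
-- result[value] = keys only ever inserts fresh keys (first occurrences), so the
-- result dict is built as a plain appended list.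
def fdvGo (full : List (String × String)) : List (String × String) → List (String × String) → List (String × List String)
  | _, [] => []
  | seen, p :: rest =>
    if seen.any (fun q => q.2 == p.2) then
      fdvGo full (seen ++ [p]) rest          -- value already handled: continue
    else
      let keys := (full.filter (fun q => q.2 == p.2)).map (·.1)
      (if 1 < keys.length then [(p.2, keys)] else []) ++ fdvGo full (seen ++ [p]) rest

def find_duplicate_values_alt (input_dict : List (String × String)) : List (String × List String) :=
  fdvGo input_dict [] input_dict

-- ===== PRECONDITION & SPEC =====
def Spec_find_duplicate_values (input_dict : List (String × String)) (out : List (String × List String)) : Prop := out = find_duplicate_values_alt input_dict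
instance (input_dict : List (String × String)) (out : List (String × List String)) : Decidable (Spec_find_duplicate_values input_dict out) := by unfold Spec_find_duplicate_values; infer_instance

-- ===== CLAIM (what is proved, stated in full; the proofs are below) =====
def Claim_equal_find_duplicate_values : Prop := ∀ (input_dict : List (String × String)), Dom_find_duplicate_values input_dict → Spec_find_duplicate_values input_dict (find_duplicate_values input_dict)

-- ===== LEMMAS AND PROOFS =====

-- items of A's grouping loop: one pair per distinct value, in first-occurrence order
theorem group_items (l : List (String × String)) :
    (l.foldl (fun d p => d.modify p.2 [] (· ++ [p.1])) PySem.Dict.empty).items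
      = (PySem.Set.ofList (l.map (·.2))).map
          (fun v => (v, (l.filter (fun q => q.2 == v)).map (·.1))) := by
  have hnd : (l.foldl (fun d p => d.modify p.2 [] (· ++ [p.1])) PySem.Dict.empty).keys.Nodup := by
    exact PySem.Dict.nodup_keys_foldl_modify_key l (·.2) [] (fun d x v => v ++ [x.1]) _ (by simp)
  rw [PySem.Dict.items_eq_map_keys _ hnd []]
  rw [PySem.Dict.keys_foldl_modify_key l (·.2) [] (fun d x v => v ++ [x.1])]
  have hkeys : PySem.Set.update (PySem.Dict.empty : PySem.Dict String (List String)).keys (l.map (·.2))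
      = PySem.Set.ofList (l.map (·.2)) := by
    simp [PySem.Set.update_nil_left]
  rw [hkeys]
  refine List.map_congr_left ?_
  intro v _
  have hswap : (l.foldl (fun d p => d.modify p.2 [] (· ++ [p.1])) PySem.Dict.empty)
      = ((l.map Prod.swap).foldl (fun d p => d.modify p.1 [] (· ++ [p.2])) PySem.Dict.empty) := by
    rw [List.foldl_map]; rfl
  rw [hswap, PySem.Dict.getD_foldl_modify_append]
  simp [List.filter_map, Function.comp_def]

-- A's port computes: the distinct values, filtered to those whose key group has >1 keys
theorem A_char (l : List (String × String)) :
    find_duplicate_values l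
      = ((PySem.Set.ofList (l.map (·.2))).filter
          (fun v => decide (1 < ((l.filter (fun q => q.2 == v)).map (·.1)).length))).map
          (fun v => (v, (l.filter (fun q => q.2 == v)).map (·.1))) := by
  unfold find_duplicate_values
  simp only [group_items]
  have hnodA : ((((PySem.Set.ofList (l.map (·.2))).map
      (fun v => (v, (l.filter (fun q => q.2 == v)).map (·.1)))).filter
        (fun q => decide (1 < q.2.length))).map (fun q => q.1)).Nodup := by
    rw [List.filter_map, List.map_map]
    have hid : ((fun q : String × List String => q.1) ∘
        (fun v => (v, (l.filter (fun q => q.2 == v)).map (·.1)))) = id := rfl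
    rw [hid, List.map_id]
    exact List.Nodup.filter _ (PySem.Set.nodup_ofList (l.map (·.2)))
  have hins := PySem.Dict.items_foldl_insert_fresh
    (l := ((PySem.Set.ofList (l.map (·.2))).map
      (fun v => (v, (l.filter (fun q => q.2 == v)).map (·.1)))).filter
        (fun q => decide (1 < q.2.length)))
    (k := fun q => q.1) (v := fun q => q.2) PySem.Dict.empty (fun a _ => by simp) hnodA
  have hempty : (PySem.Dict.empty : PySem.Dict String (List String)).items = [] := rfl
  rw [hempty, List.nil_append] at hins
  rw [hins]
  have hmapid : ∀ L : List (String × List String), L.map (fun a => ((fun q : String × List String => q.1) a, (fun q : String × List String => q.2) a)) = L := by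
    intro L; simp
  rw [hmapid, List.filter_map]
  rfl

-- B's recursion, characterised: distinct values of 'rest' not yet seen, filtered by the
-- group-size test, each paired with its key group from the full list
theorem fdvGo_char (full : List (String × String)) :
    ∀ (rest seen : List (String × String)),
      fdvGo full seen rest
        = (((PySem.Set.ofList (rest.map (·.2))).filter
              (fun v => !(seen.any (fun q => q.2 == v)))).filter
            (fun v => decide (1 < ((full.filter (fun q => q.2 == v)).map (·.1)).length))).map
            (fun v => (v, (full.filter (fun q => q.2 == v)).map (·.1))) := by
  intro rest
  induction rest with
  | nil => intro seen; rfl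
  | cons p rest ih =>
    intro seen
    have hdisc : ∀ (s : List String),
        (PySem.Set.discard s p.2).filter (fun v => !(seen.any (fun q => q.2 == v)))
          = s.filter (fun v => !((seen ++ [p]).any (fun q => q.2 == v))) := by
      intro s
      simp only [PySem.Set.discard]
      rw [List.filter_filter]
      refine List.filter_congr (fun v _ => ?_)
      simp only [List.any_append, List.any_cons, List.any_nil]
      by_cases h : p.2 = v
      · simp [h]
      · have h1 : (v == p.2) = false := by simp [Ne.symm h]
        have h2 : (p.2 == v) = false := by simp [h]
        simp [h1, h2]
    by_cases hseen : seen.any (fun q => q.2 == p.2) = true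
    · rw [show fdvGo full seen (p :: rest) = fdvGo full (seen ++ [p]) rest by
        simp [fdvGo, hseen]]
      rw [ih (seen ++ [p])]
      simp only [List.map_cons, PySem.Set.ofList_cons]
      rw [List.filter_cons]
      have : (!(seen.any fun q => q.2 == p.2)) = false := by simp [hseen]
      rw [this]
      simp only [Bool.false_eq_true, if_false]
      rw [hdisc]
    · have hseen' : seen.any (fun q => q.2 == p.2) = false :=
        Bool.eq_false_iff.mpr hseen
      rw [show fdvGo full seen (p :: rest)
          = (if 1 < ((full.filter (fun q => q.2 == p.2)).map (·.1)).length
             then [(p.2, (full.filter (fun q => q.2 == p.2)).map (·.1))] else [])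
            ++ fdvGo full (seen ++ [p]) rest by
        simp [fdvGo, hseen']]
      rw [ih (seen ++ [p])]
      simp only [List.map_cons, PySem.Set.ofList_cons]
      rw [List.filter_cons]
      have : (!(seen.any fun q => q.2 == p.2)) = true := by simp [hseen']
      rw [this]
      simp only [if_true]
      rw [List.filter_cons]
      rw [hdisc]
      simp only [List.length_map]
      by_cases hlen : 1 < (full.filter (fun q => q.2 == p.2)).length
      · simp [hlen]
      · simp [hlen]

-- the two ports agree on every input
theorem ports_agree (l : List (String × String)) :
    find_duplicate_values l = find_duplicate_values_alt l := by
  rw [A_char]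
  unfold find_duplicate_values_alt
  rw [fdvGo_char l l []]
  congr 1
  congr 1
  simp

-- ===== VERDICT (by name: the statement is the Claim_ definition above) =====
theorem find_duplicate_values_spec : Claim_equal_find_duplicate_values := by
  intro input_dict _
  exact ports_agree input_dict
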